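-- pv_equiv track=rewrite | github.com/broersma/thesis-gspimplementation | gsp/sequence.py | nthitem
-- ===== SOURCE A (Python) =====
-- def nthitem(sequence, n):
--     """
--     >>> nthitem((frozenset([1,2,3]),frozenset([4,5]),frozenset([6])),-1)
--     >>> nthitem((frozenset([1,2,3]),frozenset([4,5]),frozenset([6])),0)
--     1
--     >>> nthitem((frozenset([1,2,3]),frozenset([4,5]),frozenset([6])),1)
--     2
--     >>> nthitem((frozenset([1,2,3]),frozenset([4,5]),frozenset([6])),3)
--     4
--     >>> nthitem((frozenset([1,2,3]),frozenset([4,5]),frozenset([6])),5)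
--     6
--     >>> nthitem((frozenset([1,2,3]),frozenset([4,5]),frozenset([6])),6)
--     """
--     if n >= 0:
--         for itemset in sequence:
--             l = len(itemset)
--             if n < l:
--                 return sorted(itemset)[n]
--             n -= l
--     return None
-- ===== SOURCE B (Python) =====
-- def nthitem(sequence, n):
--     flat = [x for itemset in sequence for x in sorted(itemset)]
--     if 0 <= n < len(flat):
--         return flat[n]
--     return None
-- ===== Notes on version B (the rewrite author's own statement) =====
-- stated objective: simpler
-- what changed: Replaces the length-subtracting early-exit scan over itemsets with one flattened list of the sorted itemsets and a single bounds-checked index lookup.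
import Mathlib
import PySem

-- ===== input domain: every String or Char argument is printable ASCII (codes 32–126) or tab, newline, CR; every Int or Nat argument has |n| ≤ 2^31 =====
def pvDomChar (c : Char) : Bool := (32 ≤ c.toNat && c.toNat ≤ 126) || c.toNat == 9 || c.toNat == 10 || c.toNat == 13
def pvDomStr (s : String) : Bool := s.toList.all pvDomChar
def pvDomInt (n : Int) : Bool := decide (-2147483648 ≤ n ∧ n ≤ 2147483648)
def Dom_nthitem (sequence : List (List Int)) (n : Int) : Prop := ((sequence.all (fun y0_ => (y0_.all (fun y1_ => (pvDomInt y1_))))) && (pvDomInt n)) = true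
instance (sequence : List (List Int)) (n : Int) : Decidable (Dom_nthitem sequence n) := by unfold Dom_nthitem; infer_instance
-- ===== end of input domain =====

-- B builds the whole flattened sorted sequence and does one bounds-checked lookup,
-- replacing A's length-subtracting early-exit scan (objective: simpler).

-- ===== PORT A =====
-- the 'for itemset in sequence: … n -= l' loop, carrying the shrinking n
def nthitemLoop (sequence : List (List Int)) (n : Int) : Option Int :=
  match sequence with
  | [] => none
  | itemset :: rest =>
      let l : Int := itemset.length
      if n < l then PySem.List.pyGet? (PySem.List.sorted itemset (fun x => x) false) n
      else nthitemLoop rest (n - l)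

def nthitem (sequence : List (List Int)) (n : Int) : Option Int :=
  if n ≥ 0 then nthitemLoop sequence n else none

-- ===== PORT B =====
def nthitem_alt (sequence : List (List Int)) (n : Int) : Option Int :=
  let flat := sequence.flatMap (fun itemset => PySem.List.sorted itemset (fun x => x) false)
  if 0 ≤ n ∧ n < (flat.length : Int) then flat[n.toNat]? else none

-- ===== PRECONDITION & SPEC =====
def Spec_nthitem (sequence : List (List Int)) (n : Int) (out : Option Int) : Prop := out = nthitem_alt sequence n
instance (sequence : List (List Int)) (n : Int) (out : Option Int) : Decidable (Spec_nthitem sequence n out) := by unfold Spec_nthitem; infer_instance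

-- ===== CLAIM (what is proved, stated in full; the proofs are below) =====
def Claim_equal_nthitem : Prop := ∀ (sequence : List (List Int)) (n : Int), Dom_nthitem sequence n → Spec_nthitem sequence n (nthitem sequence n)

-- ===== LEMMAS AND PROOFS =====

-- A's loop, for nonnegative n, indexes the flattened sorted sequence
theorem nthitemLoop_eq_flat (sequence : List (List Int)) (n : Int) (hn : 0 ≤ n) :
    nthitemLoop sequence n =
      (sequence.flatMap (fun itemset => PySem.List.sorted itemset (fun x => x) false))[n.toNat]? := by
  induction sequence generalizing n with
  | nil => simp [nthitemLoop]
  | cons itemset rest ih =>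
    simp only [nthitemLoop, List.flatMap_cons]
    by_cases h : n < (itemset.length : Int)
    · rw [if_pos h]
      rw [PySem.List.pyGet?_of_nonneg (h := hn)]
      rw [List.getElem?_append_left (by rw [PySem.List.length_sorted]; omega)]
    · rw [if_neg h]
      rw [ih (n - itemset.length) (by omega)]
      rw [List.getElem?_append_right]
      · congr 1
        rw [PySem.List.length_sorted]
        omega
      · rw [PySem.List.length_sorted]
        omega

-- ===== VERDICT (by name: the statement is the Claim_ definition above) =====
theorem nthitem_spec : Claim_equal_nthitem := by
  intro sequence n _
  unfold Spec_nthitem nthitem nthitem_alt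
  by_cases hn : 0 ≤ n
  · rw [if_pos hn, nthitemLoop_eq_flat sequence n hn]
    by_cases hlt : n < ((sequence.flatMap (fun itemset => PySem.List.sorted itemset (fun x => x) false)).length : Int)
    · rw [if_pos ⟨hn, hlt⟩]
    · rw [if_neg (by tauto)]
      rw [List.getElem?_eq_none (by omega)]
  · rw [if_neg hn, if_neg (by tauto)]
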